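-- pv_equiv track=rewrite | github.com/windoze/rusk | benchmarks/phase2_object_access.py | tuple_loop
-- ===== SOURCE A (Python) =====
-- def tuple_loop(n: int) -> int:
--     t = [1, 2, 3]
--     i = 0
--     total = 0
--     while i < n:
--         t[0] = t[0] + 1
--         t[1] = t[1] + 2
--         t[2] = t[2] + 3
--         total = total + t[0] + t[1] + t[2]
--         i += 1
--     return total
-- ===== SOURCE B (Python) =====
-- def tuple_loop(n: int) -> int:
--     # closed form: each iteration k (1-based) adds (1+k)+(2+2k)+(3+3k) = 6 + 6k
--     if n <= 0:
--         return 0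
--     return 6 * n + 3 * n * (n + 1)
-- ===== Notes on version B (the rewrite author's own statement) =====
-- stated objective: faster
-- what changed: Replaced the O(n) mutation loop with the closed form 6n + 3n(n+1) (0 for n <= 0), since iteration k adds exactly 6 + 6k.
import Mathlib
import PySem

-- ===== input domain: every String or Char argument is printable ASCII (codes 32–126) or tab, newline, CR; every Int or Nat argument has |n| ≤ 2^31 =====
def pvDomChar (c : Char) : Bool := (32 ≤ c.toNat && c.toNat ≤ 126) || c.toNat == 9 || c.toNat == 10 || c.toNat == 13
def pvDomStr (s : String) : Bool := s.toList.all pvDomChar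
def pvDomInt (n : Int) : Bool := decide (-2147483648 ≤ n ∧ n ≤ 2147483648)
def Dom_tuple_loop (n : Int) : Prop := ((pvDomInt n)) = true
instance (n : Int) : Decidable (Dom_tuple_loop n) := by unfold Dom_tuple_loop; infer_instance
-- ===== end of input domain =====

-- B replaces A's O(n) accumulation loop with the closed form 6n + 3n(n+1) (objective: faster).

-- ===== PORT A =====
-- the while loop, as structural recursion on the remaining iteration count
def tupleLoopGo (fuel : Nat) (t0 t1 t2 total : Int) : Int :=
  match fuel with
  | 0 => total
  | f + 1 =>
      tupleLoopGo f (t0 + 1) (t1 + 2) (t2 + 3)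
        (total + (t0 + 1) + (t1 + 2) + (t2 + 3))

def tuple_loop (n : Int) : Int := tupleLoopGo n.toNat 1 2 3 0

-- ===== PORT B =====
def tuple_loop_alt (n : Int) : Int :=
  if n ≤ 0 then 0 else 6 * n + 3 * n * (n + 1)

-- ===== PRECONDITION & SPEC =====
def Spec_tuple_loop (n : Int) (out : Int) : Prop := out = tuple_loop_alt n
instance (n : Int) (out : Int) : Decidable (Spec_tuple_loop n out) := by unfold Spec_tuple_loop; infer_instance

-- ===== CLAIM (what is proved, stated in full; the proofs are below) =====
def Claim_equal_tuple_loop : Prop := ∀ (n : Int), Dom_tuple_loop n → Spec_tuple_loop n (tuple_loop n)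

-- ===== LEMMAS AND PROOFS =====
theorem tupleLoopGo_closed (f : Nat) :
    ∀ (t0 t1 t2 total : Int),
      tupleLoopGo f t0 t1 t2 total
        = total + (f : Int) * (t0 + t1 + t2) + 3 * (f : Int) * ((f : Int) + 1) := by
  induction f with
  | zero => intro t0 t1 t2 total; simp [tupleLoopGo]
  | succ g ih =>
      intro t0 t1 t2 total
      rw [show tupleLoopGo (g + 1) t0 t1 t2 total
            = tupleLoopGo g (t0 + 1) (t1 + 2) (t2 + 3)
                (total + (t0 + 1) + (t1 + 2) + (t2 + 3)) from rfl, ih]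
      push_cast
      ring

-- ===== VERDICT (by name: the statement is the Claim_ definition above) =====
theorem tuple_loop_spec : Claim_equal_tuple_loop := by
  intro n _
  unfold Spec_tuple_loop tuple_loop tuple_loop_alt
  rw [tupleLoopGo_closed]
  by_cases h : n ≤ 0
  · have : n.toNat = 0 := Int.toNat_of_nonpos h
    simp [this, h]
  · have hn : (n.toNat : Int) = n := Int.toNat_of_nonneg (by omega)
    rw [hn]
    simp [h]
    ring
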